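-- pv_equiv track=rewrite | github.com/Swixixle/Sweeps_Scout | src/sweep_scout/_dns.py | _merge_ns
-- ===== SOURCE A (Python) =====
-- def _merge_ns(records: list[str]) -> list[str]:
--     norm: set[str] = set()
--     for h in records:
--         if not h:
--             continue
--         x = h.lower().rstrip(".")
--         norm.add(x if x else ".")
--     return sorted(norm)
-- ===== SOURCE B (Python) =====
-- def _norm(h: str) -> str:
--     x = h.lower().rstrip(".")
--     return x if x else "."
--
--
-- def _merge_ns(records: list[str]) -> list[str]:
--     names = sorted(_norm(h) for h in records if h)
--     out: list[str] = []
--     prev = None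
--     for x in names:
--         if prev != x:
--             out.append(x)
--             prev = x
--     return out
-- ===== Notes on version B (the rewrite author's own statement) =====
-- stated objective: alternative
-- what changed: Replaces A's hash-set accumulation with building a plain list of normalized names, sorting it, and collapsing now-adjacent duplicates in one prev-tracking pass.
import Mathlib
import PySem

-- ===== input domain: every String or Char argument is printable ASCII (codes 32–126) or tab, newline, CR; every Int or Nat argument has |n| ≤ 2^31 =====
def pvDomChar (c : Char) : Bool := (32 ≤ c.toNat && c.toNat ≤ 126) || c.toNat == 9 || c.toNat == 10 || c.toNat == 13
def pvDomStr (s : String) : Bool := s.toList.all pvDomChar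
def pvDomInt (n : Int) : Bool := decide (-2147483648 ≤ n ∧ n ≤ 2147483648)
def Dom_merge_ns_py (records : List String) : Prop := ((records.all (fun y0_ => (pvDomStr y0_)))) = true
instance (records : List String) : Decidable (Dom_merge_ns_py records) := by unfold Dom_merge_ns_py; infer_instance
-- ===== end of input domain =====

-- B replaces A's hash-set accumulation with build-normalized-list, sort, then one
-- adjacent-dedup pass over the sorted list (objective: alternative decomposition, same cost).

-- shared normalization: h.lower().rstrip(".") with "." substituted for the empty result.
-- rstrip(".") is ported by hand as reverse/dropWhile '.'/reverse — exact: it removes exactly the trailing '.' characters.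
def pvNorm (h : String) : String :=
  let x := String.mk (((PySem.Str.lower h).toList.reverse.dropWhile (fun c => c == '.')).reverse)
  if x = "" then "." else x

-- ===== PORT A =====
def merge_ns_py (records : List String) : List String :=
  let norm : PySem.Set String :=
    records.foldl (fun s h => if h = "" then s else PySem.Set.add s (pvNorm h)) PySem.Set.empty
  PySem.List.sorted norm (fun x => x) false

-- ===== PORT B =====
-- the for-loop of Source B: state (out, prev), append x and update prev when prev != x
def pvDedupStep (st : List String × Option String) (x : String) : List String × Option String :=
  if st.2 ≠ some x then (st.1 ++ [x], some x) else st

def merge_ns_py_alt (records : List String) : List String :=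
  let names := PySem.List.sorted ((records.filter (fun h => h != "")).map pvNorm) (fun x => x) false
  (names.foldl pvDedupStep ([], none)).1

-- ===== PRECONDITION & SPEC =====
def Spec_merge_ns_py (records : List String) (out : List String) : Prop := out = merge_ns_py_alt records
instance (records : List String) (out : List String) : Decidable (Spec_merge_ns_py records out) := by unfold Spec_merge_ns_py; infer_instance

-- ===== CLAIM (what is proved, stated in full; the proofs are below) =====
def Claim_equal_merge_ns_py : Prop := ∀ (records : List String), Dom_merge_ns_py records → Spec_merge_ns_py records (merge_ns_py records)

-- ===== LEMMAS AND PROOFS =====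

-- functional spine of B's loop: dedup keeping the first of each run, tracking the previous element
def pvDedupAux : Option String → List String → List String
  | _, [] => []
  | last?, x :: t => if last? ≠ some x then x :: pvDedupAux (some x) t else pvDedupAux last? t

theorem pvFoldl_dedupStep (l : List String) :
    ∀ (out : List String) (prev : Option String),
      (l.foldl pvDedupStep (out, prev)).1 = out ++ pvDedupAux prev l := by
  induction l with
  | nil => intro out prev; simp [pvDedupAux]
  | cons x t ih =>
    intro out prev
    by_cases h : prev = some x
    · simp [List.foldl, pvDedupStep, pvDedupAux, h, ih]
    · simp [List.foldl, pvDedupStep, pvDedupAux, h, ih]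

theorem pvDedupAux_spec (l : List String) :
    ∀ (last? : Option String),
      l.Pairwise (· ≤ ·) → (∀ m, last? = some m → ∀ b ∈ l, m ≤ b) →
      (pvDedupAux last? l).Pairwise (· < ·) ∧
      (∀ x, x ∈ pvDedupAux last? l ↔ x ∈ l ∧ last? ≠ some x) := by
  induction l with
  | nil => intro last? _ _; simp [pvDedupAux]
  | cons x t ih =>
    intro last? hp hlast
    have hx : ∀ b ∈ t, x ≤ b := fun b hb => (List.pairwise_cons.1 hp).1 b hb
    have ht : t.Pairwise (· ≤ ·) := (List.pairwise_cons.1 hp).2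
    by_cases h : last? = some x
    · subst h
      have ⟨hpw, hmem⟩ := ih (some x) ht (by rintro m hm b hb; cases hm; exact hx b hb)
      refine ⟨by simpa [pvDedupAux] using hpw, ?_⟩
      intro y
      simp only [pvDedupAux]
      rw [if_neg (fun hc => hc rfl), hmem y]
      constructor
      · rintro ⟨hyt, hne⟩; exact ⟨List.mem_cons_of_mem _ hyt, hne⟩
      · rintro ⟨hyc, hne⟩
        rcases List.mem_cons.1 hyc with rfl | hyt
        · exact absurd rfl hne
        · exact ⟨hyt, hne⟩
    · have ⟨hpw, hmem⟩ := ih (some x) ht (by rintro m hm b hb; cases hm; exact hx b hb)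
      simp only [pvDedupAux, if_pos h]
      constructor
      · refine List.pairwise_cons.2 ⟨?_, hpw⟩
        intro y hy
        have := (hmem y).1 hy
        exact lt_of_le_of_ne (hx y this.1) (by simpa using this.2)
      · intro y
        constructor
        · intro hy
          rcases List.mem_cons.1 hy with rfl | hy'
          · exact ⟨List.mem_cons_self .., h⟩
          · have := (hmem y).1 hy'
            refine ⟨List.mem_cons_of_mem _ this.1, ?_⟩
            rintro rfl
            have hyx : y ≤ x := by
              rcases hlast y rfl x (List.mem_cons_self ..) with h'
              exact h'
            have hxy : x ≤ y := hx y this.1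
            exact this.2 (by rw [le_antisymm hxy hyx])
        · rintro ⟨hyc, hne⟩
          rcases List.mem_cons.1 hyc with rfl | hyt
          · exact List.mem_cons_self ..
          · by_cases hxy : x = y
            · subst hxy; exact List.mem_cons_self ..
            · exact List.mem_cons_of_mem _ ((hmem y).2 ⟨hyt, by simpa using hxy⟩)

theorem pvFoldA (records : List String) :
    ∀ (s : PySem.Set String),
      records.foldl (fun s h => if h = "" then s else PySem.Set.add s (pvNorm h)) s
        = ((records.filter (fun h => h != "")).map pvNorm).foldl PySem.Set.add s := by
  induction records with
  | nil => intro s; rfl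
  | cons h t ih =>
    intro s
    by_cases hh : h = ""
    · simp [List.foldl, hh, ih]
    · simp [List.foldl, hh, ih]

-- ===== VERDICT (by name: the statement is the Claim_ definition above) =====
theorem merge_ns_py_spec : Claim_equal_merge_ns_py := by
  intro records _
  unfold Spec_merge_ns_py merge_ns_py merge_ns_py_alt
  set L := (records.filter (fun h => h != "")).map pvNorm with hL
  have hfold : records.foldl (fun s h => if h = "" then s else PySem.Set.add s (pvNorm h)) PySem.Set.empty
      = PySem.Set.ofList L := by
    rw [PySem.Set.ofList_eq_foldl]; exact pvFoldA records PySem.Set.empty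
  rw [hfold, pvFoldl_dedupStep]
  simp only [List.nil_append]
  have hsortpw : (PySem.List.sorted L (fun x => x) false).Pairwise (· ≤ ·) := by
    simpa using PySem.List.sorted_pairwise L (fun x => x)
  obtain ⟨hpw, hmem⟩ := pvDedupAux_spec (PySem.List.sorted L (fun x => x) false) none hsortpw (by simp)
  apply PySem.List.sorted_eq_of_perm_of_pairwise_lt
  · rw [List.perm_ext_iff_of_nodup (hpw.imp fun h => ne_of_lt h) (PySem.Set.nodup_ofList L)]
    intro a
    rw [hmem a]
    simp [PySem.Set.mem_ofList, PySem.List.mem_sorted]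
  · simpa using hpw
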